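-- pv_equiv track=rewrite | github.com/Maickl-Denis/GB-python | less6.1/DZ/03.py | FIO
-- ===== SOURCE A (Python) =====
-- def FIO(lines: list) -> dict:
--     result = {}
--     for name in lines:
--         if name[0] not in result:
--             result[name[0]] = [name]
--         else:
--             result[name[0]].append(name)
--     return result
-- ===== SOURCE B (Python) =====
-- def FIO(lines: list) -> dict:
--     # Two-pass: dedup the first characters in order of first appearance,
--     # then build each group with one filtering pass per key.
--     keys = list(dict.fromkeys(name[0] for name in lines))
--     return {k: [name for name in lines if name[0] == k] for k in keys}
-- ===== Notes on version B (the rewrite author's own statement) =====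
-- stated objective: alternative
-- what changed: Replaces A's single-pass conditional dict accumulation with a two-pass pipeline: dedup of first characters (dict.fromkeys) then a dict comprehension filtering the list once per key.
-- outside the precondition, e.g. on FIO(['ab', '']): A raises IndexError, B raises IndexError
import Mathlib
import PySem

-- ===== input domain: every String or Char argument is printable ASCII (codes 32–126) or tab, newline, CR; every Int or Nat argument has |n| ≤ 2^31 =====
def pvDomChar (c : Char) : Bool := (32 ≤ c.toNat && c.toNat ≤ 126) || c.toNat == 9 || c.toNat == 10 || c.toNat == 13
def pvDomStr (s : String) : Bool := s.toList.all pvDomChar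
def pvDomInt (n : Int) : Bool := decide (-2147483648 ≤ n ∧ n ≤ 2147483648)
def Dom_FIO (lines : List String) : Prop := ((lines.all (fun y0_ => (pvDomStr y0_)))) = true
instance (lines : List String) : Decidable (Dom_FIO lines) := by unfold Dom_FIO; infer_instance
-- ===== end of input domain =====

-- B replaces A's single-pass conditional dict accumulation by a two-pass dedup-keys-then-filter-per-key pipeline (alternative decomposition, same results).


-- name[0] as a 1-character Python string; Pre_FIO guarantees the index is in range
-- (on "" Python raises IndexError; the "" result here is never reached inside Pre_).
def pvKey (name : String) : String :=
  match PySem.Str.pyGet? name 0 with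
  | some c => String.ofList [c]
  | none => ""

-- ===== PORT A =====
def FIO (lines : List String) : List (String × List String) :=
  (lines.foldl
    (fun d name =>
      if d.contains (pvKey name) = false then
        d.insert (pvKey name) [name]
      else
        d.modify (pvKey name) [] (· ++ [name]))
    (PySem.Dict.empty : PySem.Dict String (List String))).items

-- ===== PORT B =====
def FIO_alt (lines : List String) : List (String × List String) :=
  (PySem.List.dedup (lines.map pvKey)).map
    (fun k => (k, lines.filter (fun name => pvKey name == k)))

-- ===== PRECONDITION & SPEC =====
-- Pre_ excludes inputs containing the empty string, on which both Pythons raise IndexError (name[0]).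
def Pre_FIO (lines : List String) : Prop := "" ∉ lines
instance (lines : List String) : Decidable (Pre_FIO lines) := by unfold Pre_FIO; infer_instance

def pvWitness_FIO : List String := ["Anna", "Boris", "alex", "Bella"]

def Spec_FIO (lines : List String) (out : List (String × List String)) : Prop := out = FIO_alt lines
instance (lines : List String) (out : List (String × List String)) : Decidable (Spec_FIO lines out) := by unfold Spec_FIO; infer_instance

-- ===== CLAIM (what is proved, stated in full; the proofs are below) =====
def Claim_equal_FIO : Prop := ∀ (lines : List String), Dom_FIO lines → Pre_FIO lines → Spec_FIO lines (FIO lines)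

-- ===== LEMMAS AND PROOFS =====

-- A's two branches are both the single modify step (insert of a fresh key = append to []).
theorem FIO_step_eq_modify (d : PySem.Dict String (List String)) (name : String) :
    (if d.contains (pvKey name) = false then
        d.insert (pvKey name) [name]
      else
        d.modify (pvKey name) [] (· ++ [name]))
    = d.modify (pvKey name) [] (· ++ [name]) := by
  by_cases h : d.contains (pvKey name) = false
  · simp [h, PySem.Dict.modify, PySem.Dict.getD_of_not_contains d [] h]
  · simp [h]

theorem FIO_eq_modify_loop (lines : List String) :
    FIO lines =
      (lines.foldl (fun d name => d.modify (pvKey name) [] (· ++ [name]))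
        (PySem.Dict.empty : PySem.Dict String (List String))).items := by
  unfold FIO
  congr 1
  exact PySem.List.foldl_congr_mem lines _ _ _ (fun d name _ => FIO_step_eq_modify d name)

-- ===== VERDICT (by name: the statement is the Claim_ definition above) =====
theorem FIO_getD (lines : List String) (c : String) :
    (lines.foldl (fun d name => d.modify (pvKey name) [] (· ++ [name]))
      (PySem.Dict.empty : PySem.Dict String (List String))).getD c []
    = lines.filter (fun n => pvKey n == c) := by
  have h := PySem.Dict.getD_foldl_modify_append
    (lines.map (fun n => (pvKey n, n)))
    (PySem.Dict.empty : PySem.Dict String (List String)) c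
  simpa [List.foldl_map, List.filter_map, Function.comp_def, List.map_map] using h

theorem FIO_spec : Claim_equal_FIO := by
  intro lines _ _
  show FIO lines = FIO_alt lines
  rw [FIO_eq_modify_loop]
  have hnd : ((lines.foldl (fun d name => d.modify (pvKey name) [] (· ++ [name]))
      (PySem.Dict.empty : PySem.Dict String (List String))).keys).Nodup :=
    PySem.Dict.nodup_keys_foldl_modify_key lines pvKey []
      (fun _ x => (· ++ [x])) _ PySem.Dict.nodup_keys_empty
  rw [PySem.Dict.items_eq_map_keys _ hnd []]
  rw [PySem.Dict.keys_foldl_modify_key lines pvKey [] (fun _ x => (· ++ [x]))]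
  unfold FIO_alt
  have hkeys : PySem.Set.update
      ((PySem.Dict.empty : PySem.Dict String (List String)).keys) (lines.map pvKey)
      = PySem.List.dedup (lines.map pvKey) := rfl
  rw [hkeys]
  exact List.map_congr_left (fun k _ => by rw [FIO_getD lines k])
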